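-- pv_equiv track=rewrite | github.com/skyWalker1997/TrafficDataProcesser | driver_origin_data_flix.py | data_flix
-- ===== SOURCE A (Python) =====
-- def data_flix(data_arr):
--     driver_dict = {}
--     for one_line in data_arr:
--         temp_arr = []
--         if one_line[0] in driver_dict.keys():
--             temp_arr = driver_dict[one_line[0]]
--             # for i in range(len(temp_arr)):
--             #     if i == 0:
--             #         if one_line[3] - temp_arr[i][3] >
--             #     if one_line[3] - temp_arr[][3] > 20
--             if (abs((int(one_line[3]) - int(temp_arr[len(temp_arr)-1][3])))) > 20:
--                 temp_arr.append(one_line)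
--                 driver_dict[one_line[0]] = temp_arr
--         else:
--             temp_arr.append(one_line)
--             driver_dict[one_line[0]] = temp_arr
--     return  driver_dict
-- ===== SOURCE B (Python) =====
-- def _filter_gaps(lines):
--     kept = []
--     for line in lines:
--         if not kept or abs(int(line[3]) - int(kept[-1][3])) > 20:
--             kept.append(line)
--     return kept
--
--
-- def data_flix(data_arr):
--     groups = {}
--     for line in data_arr:
--         groups.setdefault(line[0], []).append(line)
--     return {key: _filter_gaps(lines) for key, lines in groups.items()}
-- ===== Notes on version B (the rewrite author's own statement) =====
-- stated objective: alternative
-- what changed: Replaced A's single interleaved dict-lookup-and-conditionally-append loop with a two-phase decomposition: one pass grouping all lines by driver key, then an independent gap-filter (keep a line iff it is the group's first or differs from the last kept line's field 3 by more than 20) applied to each group.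
import Mathlib
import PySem

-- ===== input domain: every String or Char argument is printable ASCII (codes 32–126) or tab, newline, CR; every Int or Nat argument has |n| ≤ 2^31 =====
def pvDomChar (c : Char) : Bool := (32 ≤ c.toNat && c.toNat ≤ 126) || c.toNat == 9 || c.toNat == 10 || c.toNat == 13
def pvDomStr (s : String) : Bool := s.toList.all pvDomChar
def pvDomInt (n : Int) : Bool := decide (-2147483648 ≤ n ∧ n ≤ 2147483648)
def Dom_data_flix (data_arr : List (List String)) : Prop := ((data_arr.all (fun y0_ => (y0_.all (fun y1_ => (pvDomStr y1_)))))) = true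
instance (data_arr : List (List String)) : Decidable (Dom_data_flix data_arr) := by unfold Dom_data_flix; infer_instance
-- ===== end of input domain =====

-- B replaces A's single interleaved lookup-and-filter loop by a group-by-driver pass followed by an
-- independent gap-filter of each group (objective: alternative decomposition, similar cost).

-- ===== PORT A =====
-- literal transliteration of A: one fold over the lines; 'one_line[0] in driver_dict.keys()' is
-- Dict.contains, 'driver_dict[one_line[0]]' is getD with default [] (unreachable: contains holds).
-- one_line[0] / one_line[3] / temp_arr[len(temp_arr)-1] are PySem.List.pyGetD with a default and
-- int(...) is PySem.Int.ofStr? with default 0; the defaults are only reachable where Python A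
-- raises (excluded by Pre_ below).
def data_flix (data_arr : List (List String)) : List (String × List (List String)) :=
  (data_arr.foldl
    (fun (driver_dict : PySem.Dict String (List (List String))) one_line =>
      if driver_dict.contains (PySem.List.pyGetD one_line 0 "") then
        let temp_arr := driver_dict.getD (PySem.List.pyGetD one_line 0 "") []
        if 20 < |(PySem.Int.ofStr? (PySem.List.pyGetD one_line 3 "")).getD 0
                 - (PySem.Int.ofStr? (PySem.List.pyGetD (PySem.List.pyGetD temp_arr ((temp_arr.length : Int) - 1) []) 3 "")).getD 0|
        then driver_dict.insert (PySem.List.pyGetD one_line 0 "") (temp_arr ++ [one_line])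
        else driver_dict
      else driver_dict.insert (PySem.List.pyGetD one_line 0 "") [one_line])
    PySem.Dict.empty).items

-- ===== PORT B =====
-- transliteration of Source B's _filter_gaps: kept[-1] is pyGetD kept (-1) []
def dataFlixFilterGaps (lines : List (List String)) : List (List String) :=
  lines.foldl
    (fun kept line =>
      if kept.isEmpty
         ∨ 20 < |(PySem.Int.ofStr? (PySem.List.pyGetD line 3 "")).getD 0
                 - (PySem.Int.ofStr? (PySem.List.pyGetD (PySem.List.pyGetD kept (-1) []) 3 "")).getD 0|
      then kept ++ [line] else kept) []

-- groups.setdefault(line[0], []).append(line) is insert of getD ++ [line]; Source B's final dict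
-- comprehension over groups.items() (keys already distinct, insertion order) is the map over items.
def data_flix_alt (data_arr : List (List String)) : List (String × List (List String)) :=
  ((data_arr.foldl
      (fun (groups : PySem.Dict String (List (List String))) line =>
        groups.insert (PySem.List.pyGetD line 0 "") (groups.getD (PySem.List.pyGetD line 0 "") [] ++ [line]))
      PySem.Dict.empty).items).map
    (fun kv => (kv.1, dataFlixFilterGaps kv.2))

-- ===== PRECONDITION & SPEC =====
-- Pre_ excludes exactly the inputs on which Python A raises: an empty line (IndexError on
-- one_line[0]), or a line whose driver key (first field) occurs in two or more lines but which is
-- shorter than 4 fields (IndexError on [3]) or whose field 3 is not an int literal (ValueError).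
def Pre_data_flix (data_arr : List (List String)) : Prop :=
  ∀ l ∈ data_arr, l ≠ [] ∧
    (2 ≤ data_arr.countP (fun m => m.head? == l.head?) →
      4 ≤ l.length ∧ (PySem.Int.ofStr? (PySem.List.pyGetD l 3 "")).isSome = true)
instance (data_arr : List (List String)) : Decidable (Pre_data_flix data_arr) := by unfold Pre_data_flix; infer_instance

def pvWitness_data_flix : List (List String) :=
  [["d1", "x", "y", "5"], ["d2", "x", "y", "7"], ["d1", "x", "y", "40"], ["d1", "x", "y", "45"]]

def Spec_data_flix (data_arr : List (List String)) (out : List (String × List (List String))) : Prop := out = data_flix_alt data_arr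
instance (data_arr : List (List String)) (out : List (String × List (List String))) : Decidable (Spec_data_flix data_arr out) := by unfold Spec_data_flix; infer_instance

-- ===== CLAIM (what is proved, stated in full; the proofs are below) =====
def Claim_equal_data_flix : Prop := ∀ (data_arr : List (List String)), Dom_data_flix data_arr → Pre_data_flix data_arr → Spec_data_flix data_arr (data_flix data_arr)

-- ===== LEMMAS AND PROOFS =====
-- The A = B equality in fact holds for the (total) ports on every input; the proof does not need
-- Dom or Pre beyond introducing them. Strategy: A's fold step commutes with the value-map pvMap
-- that carries B's grouping dict to A's filtered dict (invariant: keys Nodup, group values nonempty).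

def pvMap (g : PySem.Dict String (List (List String))) : PySem.Dict String (List (List String)) :=
  PySem.Dict.mk (g.items.map (fun kv => (kv.1, dataFlixFilterGaps kv.2)))

lemma pvFilter_ne_nil (t : List (List String)) (h : t ≠ []) : dataFlixFilterGaps t ≠ [] := by
  obtain ⟨a, rest, rfl⟩ := List.exists_cons_of_ne_nil h
  show (List.foldl _ [] (a :: rest)) ≠ []
  rw [List.foldl_cons]
  have : ∀ (r : List (List String)) (kept : List (List String)), kept ≠ [] → List.foldl
      (fun kept line =>
        if kept.isEmpty
          ∨ 20 < |(PySem.Int.ofStr? (PySem.List.pyGetD line 3 "")).getD 0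
                  - (PySem.Int.ofStr? (PySem.List.pyGetD (PySem.List.pyGetD kept (-1) []) 3 "")).getD 0|
        then kept ++ [line] else kept) kept r ≠ [] := by
    intro r
    induction r with
    | nil => intro kept hk; simpa using hk
    | cons x xs ih =>
      intro kept hk
      rw [List.foldl_cons]
      apply ih
      split
      · simp
      · exact hk
  apply this
  simp

lemma pvLast_eq (t : List (List String)) :
    PySem.List.pyGetD t ((t.length : Int) - 1) [] = PySem.List.pyGetD t (-1) [] := by
  rcases t with _ | ⟨a, rest⟩
  · rfl
  · have hidx : PySem.List.pyIdx? (a :: rest).length (((a :: rest).length : Int) - 1)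
        = PySem.List.pyIdx? (a :: rest).length (-1) := by
      have hn : (1 : Int) ≤ ((a :: rest).length : Int) := by exact_mod_cast Nat.succ_le_succ (Nat.zero_le _)
      simp only [PySem.List.pyIdx?]
      have h1 : (0 : Int) ≤ ((a :: rest).length : Int) - 1 := by omega
      have h2 : ((a :: rest).length : Int) - 1 < ((a :: rest).length : Int) := by omega
      have h3 : ¬ (0:Int) ≤ -1 := by omega
      have h4 : -((a :: rest).length : Int) ≤ -1 := by omega
      rw [if_pos h1, if_pos h2, if_neg h3, if_pos h4]
      congr 1
      omega
    simp only [PySem.List.pyGetD, PySem.List.pyGet?, hidx]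

lemma pvMap_get? (g : PySem.Dict String (List (List String))) (k : String) :
    (pvMap g).get? k = (g.get? k).map dataFlixFilterGaps := by
  simp [pvMap, PySem.Dict.get?, List.find?_map, Option.map_map, Function.comp_def]

lemma pvMap_insert (g : PySem.Dict String (List (List String))) (k : String) (v : List (List String)) :
    pvMap (g.insert k v) = (pvMap g).insert k (dataFlixFilterGaps v) := by
  have hc : (pvMap g).contains k = g.contains k := by
    simp [pvMap, PySem.Dict.contains, List.any_map, Function.comp_def]
  apply PySem.Dict.ext
  rw [show (pvMap (g.insert k v)).items = (g.insert k v).items.map (fun kv => (kv.1, dataFlixFilterGaps kv.2)) from rfl,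
      PySem.Dict.items_insert, PySem.Dict.items_insert, hc]
  split
  · rw [show (pvMap g).items = g.items.map (fun kv => (kv.1, dataFlixFilterGaps kv.2)) from rfl]
    rw [List.map_map, List.map_map]
    apply List.map_congr_left
    intro p _
    by_cases hp : p.1 = k <;> simp [hp]
  · rw [show (pvMap g).items = g.items.map (fun kv => (kv.1, dataFlixFilterGaps kv.2)) from rfl]
    simp

lemma pvInsert_same (d : PySem.Dict String (List (List String))) (k : String) (v : List (List String))
    (hnd : d.keys.Nodup) (h : d.get? k = some v) : d.insert k v = d := by
  have hc : d.contains k = true := by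
    rw [PySem.Dict.contains_eq_isSome_get?, h]; rfl
  apply PySem.Dict.ext
  rw [PySem.Dict.items_insert, if_pos hc]
  conv_rhs => rw [← List.map_id d.items]
  apply List.map_congr_left
  intro p hp
  by_cases hpk' : p.1 = k
  · have hget : d.get? k = some p.2 := by
      apply PySem.Dict.get?_of_mem_items d (hpk' ▸ (show (p.1, p.2) ∈ d.items by simpa using hp)) hnd
    rw [h] at hget
    have hv : v = p.2 := by injection hget
    obtain ⟨p1, p2⟩ := p
    simp only at hpk' hv
    simp [hpk', hv]
  · simp [show ¬ (p.1 == k) = true by simpa using hpk']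


def pvFStep (kept : List (List String)) (line : List String) : List (List String) :=
  if kept.isEmpty
     ∨ 20 < |(PySem.Int.ofStr? (PySem.List.pyGetD line 3 "")).getD 0
             - (PySem.Int.ofStr? (PySem.List.pyGetD (PySem.List.pyGetD kept (-1) []) 3 "")).getD 0|
  then kept ++ [line] else kept

lemma pvFilter_append (t : List (List String)) (l : List String) :
    dataFlixFilterGaps (t ++ [l]) = pvFStep (dataFlixFilterGaps t) l := by
  simp [dataFlixFilterGaps, List.foldl_append, pvFStep]

def pvStepA (d : PySem.Dict String (List (List String))) (one_line : List String) :
    PySem.Dict String (List (List String)) :=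
  if d.contains (PySem.List.pyGetD one_line 0 "") then
    let temp_arr := d.getD (PySem.List.pyGetD one_line 0 "") []
    if 20 < |(PySem.Int.ofStr? (PySem.List.pyGetD one_line 3 "")).getD 0
             - (PySem.Int.ofStr? (PySem.List.pyGetD (PySem.List.pyGetD temp_arr ((temp_arr.length : Int) - 1) []) 3 "")).getD 0|
    then d.insert (PySem.List.pyGetD one_line 0 "") (temp_arr ++ [one_line])
    else d
  else d.insert (PySem.List.pyGetD one_line 0 "") [one_line]

def pvStepG (g : PySem.Dict String (List (List String))) (line : List String) :
    PySem.Dict String (List (List String)) :=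
  g.insert (PySem.List.pyGetD line 0 "") (g.getD (PySem.List.pyGetD line 0 "") [] ++ [line])

lemma pvContains_pvMap (g : PySem.Dict String (List (List String))) (k : String) :
    (pvMap g).contains k = g.contains k := by
  simp [pvMap, PySem.Dict.contains, List.any_map, Function.comp_def]

lemma pvKeys_pvMap (g : PySem.Dict String (List (List String))) : (pvMap g).keys = g.keys := by
  simp [pvMap, PySem.Dict.keys, List.map_map, Function.comp_def]

lemma pvFilter_singleton (l : List String) : dataFlixFilterGaps [l] = [l] := by
  simp [dataFlixFilterGaps]

lemma pvStep_comm (g : PySem.Dict String (List (List String))) (l : List String)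
    (hnd : g.keys.Nodup) (hne : ∀ kv ∈ g.items, kv.2 ≠ []) :
    pvStepA (pvMap g) l = pvMap (pvStepG g l) := by
  unfold pvStepA pvStepG
  cases hc : g.contains (PySem.List.pyGetD l 0 "") with
  | false =>
    rw [pvContains_pvMap, hc]
    have hd : g.getD (PySem.List.pyGetD l 0 "") [] = [] :=
      PySem.Dict.getD_of_not_contains g _ hc
    rw [hd, List.nil_append, pvMap_insert, pvFilter_singleton]
    simp
  | true =>
    rw [pvContains_pvMap, hc]
    obtain ⟨t, hg⟩ : ∃ t, g.get? (PySem.List.pyGetD l 0 "") = some t := by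
      have := PySem.Dict.contains_eq_isSome_get? g (PySem.List.pyGetD l 0 "")
      rw [hc] at this
      exact Option.isSome_iff_exists.mp this.symm
    have hd : g.getD (PySem.List.pyGetD l 0 "") [] = t := by
      rw [PySem.Dict.getD_eq_get?_getD, hg]; rfl
    have h1 : (pvMap g).get? (PySem.List.pyGetD l 0 "") = some (dataFlixFilterGaps t) := by
      rw [pvMap_get?, hg]; rfl
    have hdm : (pvMap g).getD (PySem.List.pyGetD l 0 "") [] = dataFlixFilterGaps t := by
      rw [PySem.Dict.getD_eq_get?_getD, h1]; rfl
    have htne : t ≠ [] := hne _ (PySem.Dict.mem_items_of_get?_eq_some g hg)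
    have hFne : dataFlixFilterGaps t ≠ [] := pvFilter_ne_nil t htne
    rw [hd, pvMap_insert, pvFilter_append]
    simp only [if_true, hdm]
    rw [show pvFStep (dataFlixFilterGaps t) l
        = if 20 < |(PySem.Int.ofStr? (PySem.List.pyGetD l 3 "")).getD 0
             - (PySem.Int.ofStr? (PySem.List.pyGetD (PySem.List.pyGetD (dataFlixFilterGaps t) (((dataFlixFilterGaps t).length : Int) - 1) []) 3 "")).getD 0|
          then dataFlixFilterGaps t ++ [l] else dataFlixFilterGaps t from by
      simp only [pvFStep, pvLast_eq, List.isEmpty_iff, hFne, false_or]]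
    split
    · rfl
    · rw [pvInsert_same _ _ _ (by rw [pvKeys_pvMap]; exact hnd) h1]
lemma pvMain (arr : List (List String)) :
    ∀ (g : PySem.Dict String (List (List String))), g.keys.Nodup → (∀ kv ∈ g.items, kv.2 ≠ []) →
      arr.foldl pvStepA (pvMap g) = pvMap (arr.foldl pvStepG g) := by
  induction arr with
  | nil => intro g _ _; rfl
  | cons l rest ih =>
    intro g hnd hne
    rw [List.foldl_cons, List.foldl_cons, pvStep_comm g l hnd hne]
    apply ih
    · exact PySem.Dict.nodup_keys_insert _ _ _ hnd
    · intro kv hkv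
      rcases (PySem.Dict.mem_items_insert _ _ _ _).mp hkv with h | ⟨h, _⟩
      · subst h; simp
      · exact hne _ h

-- ===== VERDICT (by name: the statement is the Claim_ definition above) =====
theorem data_flix_spec : Claim_equal_data_flix := by
  intro data_arr _ _
  show data_flix data_arr = data_flix_alt data_arr
  have h := pvMain data_arr PySem.Dict.empty (by simp [PySem.Dict.keys, PySem.Dict.empty]) (by intro kv hkv; simp [PySem.Dict.empty] at hkv)
  show (data_arr.foldl pvStepA PySem.Dict.empty).items = _
  have hempty : (PySem.Dict.empty : PySem.Dict String (List (List String))) = pvMap PySem.Dict.empty := rfl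
  rw [hempty, h]
  rfl
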